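-- pv_equiv track=rewrite | github.com/MR-chenliang/AndroidDeepmem | create_graph/graph.py | get_node_neighbor_seg
-- ===== SOURCE A (Python) =====
-- SEARCH_LEN = 128
--
-- WORD_SIZE = 8
--
-- def get_node_neighbor_seg(list_node_vaddr, dict_node_vaddr_to_size, dict_ptr_to_dest, set_node_addr):
--     set_ptr = set(dict_ptr_to_dest.keys())
--     dict_node_to_ln = {}
--     dict_node_to_rn = {}
--     dict_node_to_lp = {}
--     dict_node_to_rp = {}
--     for idx, node_vaddr in enumerate(list_node_vaddr):
--         if dict_node_vaddr_to_size[node_vaddr] <= 0: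
--             continue
--         if idx - 1 >= 0:   # start: idx = 1
--             #if two nodes are too far away, not neighbor
--             if list_node_vaddr[idx] - list_node_vaddr[idx - 1] < 512:
--                 dict_node_to_ln[node_vaddr] = list_node_vaddr[idx - 1]
--         if idx + 1 < len(list_node_vaddr):
--             if list_node_vaddr[idx + 1] - list_node_vaddr[idx] < 512:
--                 dict_node_to_rn[node_vaddr] = list_node_vaddr[idx + 1]
--
--         dict_node_to_rp[node_vaddr] = set()
--         right_ptr_addr = node_vaddr + dict_node_vaddr_to_size[node_vaddr]
--         while right_ptr_addr in set_ptr: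
--             dest = dict_ptr_to_dest[right_ptr_addr]
--             try_time = SEARCH_LEN
--             while dest not in set_node_addr and try_time > 0:
--                 dest -= 1
--                 try_time -= 1
--             if dest in set_node_addr:
--                 dict_node_to_rp[node_vaddr].add(dest)
--             right_ptr_addr += WORD_SIZE
--
--         dict_node_to_lp[node_vaddr] = set()
--         left_ptr_addr = node_vaddr - WORD_SIZE  # 8B
--         while left_ptr_addr in set_ptr:
--             dest = dict_ptr_to_dest[left_ptr_addr]
--             try_time = SEARCH_LEN
--             while dest not in set_node_addr and try_time > 0:
--                 dest -= 1
--                 try_time -= 1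
--             if dest in set_node_addr:
--                 dict_node_to_lp[node_vaddr].add(dest)
--             left_ptr_addr -= WORD_SIZE
--     return dict_node_to_ln, dict_node_to_rn, dict_node_to_lp, dict_node_to_rp
-- ===== SOURCE B (Python) =====
-- def _bisect_right(a, x):
--     lo, hi = 0, len(a)
--     while lo < hi:
--         mid = (lo + hi) // 2
--         if x < a[mid]:
--             hi = mid
--         else:
--             lo = mid + 1
--     return lo
--
-- def _resolve(sorted_addrs, dest):
--     i = _bisect_right(sorted_addrs, dest)
--     if i > 0:
--         cand = sorted_addrs[i - 1]
--         if dest - cand <= 128: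
--             return cand
--     return None
--
-- def get_node_neighbor_seg(list_node_vaddr, dict_node_vaddr_to_size, dict_ptr_to_dest, set_node_addr):
--     sorted_addrs = sorted(set(set_node_addr))
--     ptrs = sorted(set(dict_ptr_to_dest))
--     # chain_r[p] = resolved destinations of the whole upward pointer chain starting at p
--     chain_r = {}
--     for p in reversed(ptrs):
--         c = _resolve(sorted_addrs, dict_ptr_to_dest[p])
--         chain_r[p] = ([c] if c is not None else []) + chain_r.get(p + 8, [])
--     chain_l = {}
--     for p in ptrs:
--         c = _resolve(sorted_addrs, dict_ptr_to_dest[p])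
--         chain_l[p] = ([c] if c is not None else []) + chain_l.get(p - 8, [])
--     ln = {}
--     for a, b in zip(list_node_vaddr, list_node_vaddr[1:]):
--         if dict_node_vaddr_to_size[b] > 0 and b - a < 512:
--             ln[b] = a
--     rn = {}
--     for a, b in zip(list_node_vaddr, list_node_vaddr[1:]):
--         if dict_node_vaddr_to_size[a] > 0 and b - a < 512:
--             rn[a] = b
--     lp = {}
--     rp = {}
--     for v in list_node_vaddr:
--         size = dict_node_vaddr_to_size[v]
--         if size <= 0:
--             continue
--         rp[v] = set(chain_r.get(v + size, []))
--         lp[v] = set(chain_l.get(v - 8, []))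
--     return ln, rn, lp, rp
-- ===== Notes on version B (the rewrite author's own statement) =====
-- stated objective: alternative
-- what changed: B replaces A's per-node pointer walks (each with a 128-step decrement-and-probe per pointer) by precomputation: one descending and one ascending pass over the sorted pointer-address set build, for every pointer address, the resolved-destination list of the whole chain starting there (destinations resolved by binary search on the sorted node addresses), so the per-node loop does two dict lookups; left/right neighbors come from separate zip passes.
import Mathlib
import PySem

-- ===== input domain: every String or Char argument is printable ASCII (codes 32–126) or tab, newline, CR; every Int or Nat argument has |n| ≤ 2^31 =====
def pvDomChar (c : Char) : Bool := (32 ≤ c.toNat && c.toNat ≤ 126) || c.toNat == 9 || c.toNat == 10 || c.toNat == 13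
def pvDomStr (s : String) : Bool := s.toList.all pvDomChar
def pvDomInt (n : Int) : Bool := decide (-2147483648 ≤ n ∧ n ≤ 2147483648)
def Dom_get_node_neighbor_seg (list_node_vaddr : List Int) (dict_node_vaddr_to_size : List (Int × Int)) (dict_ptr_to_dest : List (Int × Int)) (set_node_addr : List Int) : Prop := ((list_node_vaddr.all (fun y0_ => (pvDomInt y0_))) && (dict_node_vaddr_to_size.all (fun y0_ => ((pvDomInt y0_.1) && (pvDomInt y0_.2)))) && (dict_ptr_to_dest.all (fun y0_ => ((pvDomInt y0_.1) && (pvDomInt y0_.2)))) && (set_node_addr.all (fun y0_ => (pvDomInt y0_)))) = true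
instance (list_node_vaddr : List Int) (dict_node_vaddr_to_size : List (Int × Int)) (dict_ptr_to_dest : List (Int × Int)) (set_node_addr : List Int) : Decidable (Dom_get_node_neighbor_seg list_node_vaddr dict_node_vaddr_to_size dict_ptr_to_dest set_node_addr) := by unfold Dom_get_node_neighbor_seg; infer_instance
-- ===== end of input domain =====

-- B precomputes, in one descending and one ascending pass over the sorted pointer set, the
-- resolved-destination list of the whole pointer chain starting at each pointer address
-- (destinations resolved by a binary search on the sorted node addresses), so each node does two
-- dict lookups instead of A's per-node pointer walks with 128-step backward probes (objective: alternative).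

-- termination helper for A's pointer walks (cited by the ports' decreasing_by)
theorem pvFilter_lt_of_mem (s : List Int) (p q : Int → Bool) (a : Int) (ha : a ∈ s)
    (hq : q a = true) (hp : p a = false) (himp : ∀ x, p x = true → q x = true) :
    (s.filter p).length < (s.filter q).length := by
  induction s with
  | nil => cases ha
  | cons b s ih =>
    have hle : ∀ (t : List Int), (t.filter p).length ≤ (t.filter q).length := by
      intro t
      exact List.Sublist.length_le (List.monotone_filter_right t himp)
    rcases List.mem_cons.mp ha with rfl | hmem
    · simp [hp, hq]
      exact hle s
    · have := ih hmem
      by_cases hpb : p b = true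
      · simp [hpb, himp b hpb]; omega
      · have hpb' : p b = false := by revert hpb; cases p b <;> simp
        simp only [List.filter_cons, hpb']
        cases hqb : q b <;> simp <;> omega

-- ===== PORT A =====
def pvCountdownA (S : List Int) : Int → Nat → Int
  | dest, 0 => dest
  | dest, t+1 => if S.contains dest then dest else pvCountdownA S (dest - 1) t

def pvWalkRA (set_ptr : PySem.Set Int) (ptr : PySem.Dict Int Int) (S : List Int)
    (addr : Int) (acc : PySem.Set Int) : PySem.Set Int :=
  if h : PySem.Set.contains set_ptr addr then
    let dest := ptr.getD addr 0
    let v := pvCountdownA S dest 128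
    pvWalkRA set_ptr ptr S (addr + 8) (if S.contains v then PySem.Set.add acc v else acc)
  else acc
termination_by (set_ptr.filter (fun x => decide (addr ≤ x))).length
decreasing_by
  refine pvFilter_lt_of_mem set_ptr _ _ addr ((PySem.Set.contains_iff _ _).mp h) ?_ ?_ ?_
  · simp
  · rw [decide_eq_false_iff_not]; omega
  · intro x hx
    rw [decide_eq_true_eq] at hx
    rw [decide_eq_true_eq]
    omega

def pvWalkLA (set_ptr : PySem.Set Int) (ptr : PySem.Dict Int Int) (S : List Int)
    (addr : Int) (acc : PySem.Set Int) : PySem.Set Int :=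
  if h : PySem.Set.contains set_ptr addr then
    let dest := ptr.getD addr 0
    let v := pvCountdownA S dest 128
    pvWalkLA set_ptr ptr S (addr - 8) (if S.contains v then PySem.Set.add acc v else acc)
  else acc
termination_by (set_ptr.filter (fun x => decide (x ≤ addr))).length
decreasing_by
  refine pvFilter_lt_of_mem set_ptr _ _ addr ((PySem.Set.contains_iff _ _).mp h) ?_ ?_ ?_
  · simp
  · rw [decide_eq_false_iff_not]; omega
  · intro x hx
    rw [decide_eq_true_eq] at hx
    rw [decide_eq_true_eq]
    omega

def get_node_neighbor_seg (list_node_vaddr : List Int) (dict_node_vaddr_to_size : List (Int × Int)) (dict_ptr_to_dest : List (Int × Int)) (set_node_addr : List Int) : (List (Int × Int)) × (List (Int × Int)) × (List (Int × List Int)) × (List (Int × List Int)) :=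
  let szd : PySem.Dict Int Int := PySem.Dict.mk dict_node_vaddr_to_size
  let ptr : PySem.Dict Int Int := PySem.Dict.mk dict_ptr_to_dest
  let set_ptr : PySem.Set Int := PySem.Set.ofList (PySem.Dict.keys ptr)
  let r := (PySem.List.enumerate list_node_vaddr).foldl
    (fun st iv =>
      if PySem.Dict.getD szd iv.2 0 ≤ 0 then st
      else
        ((if 0 ≤ iv.1 - 1 ∧ PySem.List.pyGetD list_node_vaddr iv.1 0 - PySem.List.pyGetD list_node_vaddr (iv.1 - 1) 0 < 512
            then st.1.insert iv.2 (PySem.List.pyGetD list_node_vaddr (iv.1 - 1) 0) else st.1),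
         (if iv.1 + 1 < PySem.List.len list_node_vaddr ∧ PySem.List.pyGetD list_node_vaddr (iv.1 + 1) 0 - PySem.List.pyGetD list_node_vaddr iv.1 0 < 512
            then st.2.1.insert iv.2 (PySem.List.pyGetD list_node_vaddr (iv.1 + 1) 0) else st.2.1),
         st.2.2.1.insert iv.2 (pvWalkLA set_ptr ptr set_node_addr (iv.2 - 8) PySem.Set.empty),
         st.2.2.2.insert iv.2 (pvWalkRA set_ptr ptr set_node_addr (iv.2 + PySem.Dict.getD szd iv.2 0) PySem.Set.empty)))
    ((PySem.Dict.empty : PySem.Dict Int Int), (PySem.Dict.empty : PySem.Dict Int Int),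
     (PySem.Dict.empty : PySem.Dict Int (List Int)), (PySem.Dict.empty : PySem.Dict Int (List Int)))
  (r.1.items, r.2.1.items, r.2.2.1.items, r.2.2.2.items)

-- ===== PORT B =====
def pvBisect (a : List Int) (x : Int) (lo hi : Int) : Int :=
  if hlt : lo < hi then
    let mid := PySem.Int.floordiv (lo + hi) 2
    -- index is always in range on reachable calls (0 ≤ lo ≤ mid < hi ≤ len a)
    if x < PySem.List.pyGetD a mid 0 then pvBisect a x lo mid
    else pvBisect a x (mid + 1) hi
  else lo
termination_by (hi - lo).toNat
decreasing_by
  · have h1 := (PySem.Int.floordiv_two_mid_bounds (lo := lo) (hi := hi) (by omega)).1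
    have h2 : PySem.Int.floordiv (lo + hi) 2 < hi :=
      (PySem.Int.floordiv_lt_iff_lt_mul (by omega)).mpr (by omega)
    omega
  · have h1 := (PySem.Int.floordiv_two_mid_bounds (lo := lo) (hi := hi) (by omega)).1
    have h2 : PySem.Int.floordiv (lo + hi) 2 < hi :=
      (PySem.Int.floordiv_lt_iff_lt_mul (by omega)).mpr (by omega)
    omega

def pvResolveB (sorted_addrs : List Int) (dest : Int) : Option Int :=
  let i := pvBisect sorted_addrs dest 0 (PySem.List.len sorted_addrs)
  if 0 < i then
    let cand := PySem.List.pyGetD sorted_addrs (i - 1) 0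
    if dest - cand ≤ 128 then some cand else none
  else none

-- '[c] if c is not None else []' for the resolved destination of one pointer
def pvOwn (sorted_addrs : List Int) (ptr : PySem.Dict Int Int) (p : Int) : List Int :=
  match pvResolveB sorted_addrs (ptr.getD p 0) with
  | some c => [c]
  | none => []

def get_node_neighbor_seg_alt (list_node_vaddr : List Int) (dict_node_vaddr_to_size : List (Int × Int)) (dict_ptr_to_dest : List (Int × Int)) (set_node_addr : List Int) : (List (Int × Int)) × (List (Int × Int)) × (List (Int × List Int)) × (List (Int × List Int)) :=
  let szd : PySem.Dict Int Int := PySem.Dict.mk dict_node_vaddr_to_size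
  let ptr : PySem.Dict Int Int := PySem.Dict.mk dict_ptr_to_dest
  let sorted_addrs := PySem.List.sorted (PySem.Set.ofList set_node_addr) (fun x => x) false
  let ptrs := PySem.List.sorted (PySem.Set.ofList (PySem.Dict.keys ptr)) (fun x => x) false
  let chain_r := ptrs.reverse.foldl
    (fun d p => d.insert p (pvOwn sorted_addrs ptr p ++ d.getD (p + 8) []))
    (PySem.Dict.empty : PySem.Dict Int (List Int))
  let chain_l := ptrs.foldl
    (fun d p => d.insert p (pvOwn sorted_addrs ptr p ++ d.getD (p - 8) []))
    (PySem.Dict.empty : PySem.Dict Int (List Int))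
  let pairs := list_node_vaddr.zip (PySem.List.slice list_node_vaddr (some 1) none)
  let ln := pairs.foldl
    (fun d pc => if 0 < PySem.Dict.getD szd pc.2 0 ∧ pc.2 - pc.1 < 512 then d.insert pc.2 pc.1 else d)
    (PySem.Dict.empty : PySem.Dict Int Int)
  let rn := pairs.foldl
    (fun d cn => if 0 < PySem.Dict.getD szd cn.1 0 ∧ cn.2 - cn.1 < 512 then d.insert cn.1 cn.2 else d)
    (PySem.Dict.empty : PySem.Dict Int Int)
  let lprp := list_node_vaddr.foldl
    (fun st v =>
      if PySem.Dict.getD szd v 0 ≤ 0 then st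
      else (st.1.insert v (PySem.Set.ofList (chain_l.getD (v - 8) [])),
            st.2.insert v (PySem.Set.ofList (chain_r.getD (v + PySem.Dict.getD szd v 0) []))))
    ((PySem.Dict.empty : PySem.Dict Int (List Int)), (PySem.Dict.empty : PySem.Dict Int (List Int)))
  (ln.items, rn.items, lprp.1.items, lprp.2.items)

-- ===== PRECONDITION & SPEC =====
-- Pre_ excludes exactly the inputs on which Python A raises KeyError: a node address of
-- list_node_vaddr that is not a key of dict_node_vaddr_to_size.
def Pre_get_node_neighbor_seg (list_node_vaddr : List Int) (dict_node_vaddr_to_size : List (Int × Int)) (dict_ptr_to_dest : List (Int × Int)) (set_node_addr : List Int) : Prop :=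
  (list_node_vaddr.all (fun v => (dict_node_vaddr_to_size.map Prod.fst).contains v)) = true
instance (list_node_vaddr : List Int) (dict_node_vaddr_to_size : List (Int × Int)) (dict_ptr_to_dest : List (Int × Int)) (set_node_addr : List Int) : Decidable (Pre_get_node_neighbor_seg list_node_vaddr dict_node_vaddr_to_size dict_ptr_to_dest set_node_addr) := by unfold Pre_get_node_neighbor_seg; infer_instance

def pvWitness_get_node_neighbor_seg : List Int × (List (Int × Int)) × (List (Int × Int)) × List Int :=
  ([0, 600], [(0, 8), (600, 16)], [(8, 3), (16, 700), (592, 610)], [3, 600])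

def Spec_get_node_neighbor_seg (list_node_vaddr : List Int) (dict_node_vaddr_to_size : List (Int × Int)) (dict_ptr_to_dest : List (Int × Int)) (set_node_addr : List Int) (out : (List (Int × Int)) × (List (Int × Int)) × (List (Int × List Int)) × (List (Int × List Int))) : Prop := out = get_node_neighbor_seg_alt list_node_vaddr dict_node_vaddr_to_size dict_ptr_to_dest set_node_addr
instance (list_node_vaddr : List Int) (dict_node_vaddr_to_size : List (Int × Int)) (dict_ptr_to_dest : List (Int × Int)) (set_node_addr : List Int) (out : (List (Int × Int)) × (List (Int × Int)) × (List (Int × List Int)) × (List (Int × List Int))) : Decidable (Spec_get_node_neighbor_seg list_node_vaddr dict_node_vaddr_to_size dict_ptr_to_dest set_node_addr out) := by unfold Spec_get_node_neighbor_seg; infer_instance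

-- ===== CLAIM (what is proved, stated in full; the proofs are below) =====
def Claim_equal_get_node_neighbor_seg : Prop := ∀ (list_node_vaddr : List Int) (dict_node_vaddr_to_size : List (Int × Int)) (dict_ptr_to_dest : List (Int × Int)) (set_node_addr : List Int), Dom_get_node_neighbor_seg list_node_vaddr dict_node_vaddr_to_size dict_ptr_to_dest set_node_addr → Pre_get_node_neighbor_seg list_node_vaddr dict_node_vaddr_to_size dict_ptr_to_dest set_node_addr → Spec_get_node_neighbor_seg list_node_vaddr dict_node_vaddr_to_size dict_ptr_to_dest set_node_addr (get_node_neighbor_seg list_node_vaddr dict_node_vaddr_to_size dict_ptr_to_dest set_node_addr)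

-- ===== LEMMAS AND PROOFS =====

theorem pvCountdownA_char (S : List Int) : ∀ (t : Nat) (dest : Int),
    dest - t ≤ pvCountdownA S dest t ∧ pvCountdownA S dest t ≤ dest ∧
    (pvCountdownA S dest t ∈ S ∨ pvCountdownA S dest t = dest - t) ∧
    (∀ a ∈ S, pvCountdownA S dest t < a → ¬ a ≤ dest) := by
  intro t
  induction t with
  | zero =>
    intro dest
    simp [pvCountdownA]
  | succ t ih =>
    intro dest
    by_cases hd : S.contains dest = true
    · have hmem : dest ∈ S := List.mem_of_elem_eq_true hd
      simp only [pvCountdownA, hd, if_true]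
      refine ⟨by omega, by omega, Or.inl hmem, ?_⟩
      intro a _ hlt hle
      omega
    · simp only [pvCountdownA, hd]
      obtain ⟨h1, h2, h3, h4⟩ := ih (dest - 1)
      push_cast
      refine ⟨by push_cast at h1; omega, by omega, ?_, ?_⟩
      · rcases h3 with h | h
        · exact Or.inl h
        · right; push_cast at h ⊢; omega
      · intro a ha hlt hle
        by_cases had : a = dest
        · subst had
          exact hd (List.elem_eq_true_of_mem ha)
        · exact h4 a ha hlt (by omega)

theorem pvBisect_char (L : List Int) (x : Int)
    (hmono : ∀ (p q : Nat) (hp : p < L.length) (hq : q < L.length), p ≤ q → L[p] ≤ L[q]) :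
    ∀ (n : Nat) (lo hi : Int), (hi - lo).toNat = n → 0 ≤ lo → lo ≤ hi → hi ≤ (L.length : Int) →
    (∀ (j : Nat) (hj : j < L.length), (j : Int) < lo → L[j] ≤ x) →
    (∀ (j : Nat) (hj : j < L.length), hi ≤ (j : Int) → x < L[j]) →
    lo ≤ pvBisect L x lo hi ∧ pvBisect L x lo hi ≤ hi ∧
    (∀ (j : Nat) (hj : j < L.length), (j : Int) < pvBisect L x lo hi → L[j] ≤ x) ∧
    (∀ (j : Nat) (hj : j < L.length), pvBisect L x lo hi ≤ (j : Int) → x < L[j]) := by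
  intro n
  induction n using Nat.strong_induction_on with
  | _ n ih =>
    intro lo hi hn h0 hlohi hhi hbelow habove
    rw [pvBisect]
    by_cases hlt : lo < hi
    · simp only [hlt, dif_pos]
      have hm1 : lo ≤ PySem.Int.floordiv (lo + hi) 2 :=
        (PySem.Int.floordiv_two_mid_bounds (by omega)).1
      have hm2 : PySem.Int.floordiv (lo + hi) 2 < hi :=
        (PySem.Int.floordiv_lt_iff_lt_mul (by omega)).mpr (by omega)
      set mid := PySem.Int.floordiv (lo + hi) 2 with hmid
      have hmlen : mid.toNat < L.length := by omega
      have hget : PySem.List.pyGetD L mid 0 = L[mid.toNat] :=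
        PySem.List.pyGetD_eq_getElem (xs := L) (i := mid) (d := 0) (by omega) (by push_cast; omega)
      by_cases hc : x < PySem.List.pyGetD L mid 0
      · simp only [hc, if_pos]
        obtain ⟨a, b, c, d⟩ := ih (mid - lo).toNat (by omega) lo mid rfl h0 (by omega) (by omega) hbelow
          (by intro j hj hmj
              calc x < L[mid.toNat] := by rw [← hget]; exact hc
              _ ≤ L[j] := hmono _ _ hmlen hj (by omega))
        exact ⟨a, by omega, c, d⟩
      · simp only [hc, if_neg, not_false_iff]
        obtain ⟨a, b, c, d⟩ := ih (hi - (mid + 1)).toNat (by omega) (mid + 1) hi rfl (by omega) (by omega) hhi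
          (by intro j hj hmj
              calc L[j] ≤ L[mid.toNat] := hmono _ _ hj hmlen (by omega)
              _ ≤ x := by rw [hget] at hc; omega) habove
        exact ⟨by omega, b, c, d⟩
    · simp only [hlt, dif_neg, not_false_iff]
      have : lo = hi := by omega
      subst this
      exact ⟨le_refl _, le_refl _, hbelow, habove⟩

theorem pvResolve_eq' (S L : List Int) (dest : Int)
    (hmemL : ∀ a : Int, a ∈ L ↔ a ∈ S)
    (hmono : ∀ (p q : Nat) (hp : p < L.length) (hq : q < L.length), p ≤ q → L[p] ≤ L[q]) :
    (if S.contains (pvCountdownA S dest 128) then some (pvCountdownA S dest 128) else none)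
      = pvResolveB L dest := by
  obtain ⟨hb1, hb2, hb3, hb4⟩ := pvCountdownA_char S 128 dest
  push_cast at hb1 hb3
  generalize hgv : pvCountdownA S dest 128 = v at hb1 hb2 hb3 hb4 ⊢
  clear hgv
  obtain ⟨hc1, hc2, hc3, hc4⟩ := pvBisect_char L dest hmono (PySem.List.len L).toNat 0
    (PySem.List.len L) (by omega) le_rfl (by simp [PySem.List.len_eq]) (by simp [PySem.List.len_eq])
    (by intro j hj hjlt; omega) (by intro j hj hjge; simp [PySem.List.len_eq] at hjge; omega)
  simp only [pvResolveB]
  generalize hgi : pvBisect L dest 0 (PySem.List.len L) = i at hc1 hc2 hc3 hc4 ⊢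
  clear hgi
  rw [PySem.List.len_eq] at hc2
  have hilen : i ≤ (L.length : Int) := hc2
  by_cases hvS : v ∈ S
  · rw [if_pos (List.elem_eq_true_of_mem hvS)]
    obtain ⟨k, hk, hkv⟩ := List.getElem_of_mem ((hmemL v).mpr hvS)
    have hipos : 0 < i := by
      by_contra hle
      have h1 : i ≤ (k : Int) := by omega
      have := hc4 k hk h1
      omega
    have hi1len : i - 1 < (L.length : Int) := by omega
    have hcand : PySem.List.pyGetD L (i - 1) 0 = L[(i - 1).toNat] :=
      PySem.List.pyGetD_eq_getElem (xs := L) (i := i - 1) (d := 0) (by omega) (by push_cast; omega)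
    have hkm : (k : Int) < i := by
      by_contra hle
      have := hc4 k hk (by omega)
      omega
    have hcle : L[(i - 1).toNat] ≤ dest := hc3 (i - 1).toNat (by omega) (by omega)
    have hcS : L[(i - 1).toNat] ∈ S := (hmemL _).mp (List.getElem_mem _)
    have hnlt : ¬ v < L[(i - 1).toNat] := fun hlt => hb4 _ hcS hlt hcle
    have hvle : v ≤ L[(i - 1).toNat] := by
      calc v = L[k] := hkv.symm
      _ ≤ L[(i - 1).toNat] := hmono _ _ hk (by omega) (by omega)
    have hceq : L[(i - 1).toNat] = v := by omega
    rw [if_pos hipos, hcand, hceq, if_pos (by omega)]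
  · rw [if_neg (by simpa using hvS)]
    rcases hb3 with h | hveq
    · exact absurd h hvS
    by_cases hipos : 0 < i
    · have hi1len : i - 1 < (L.length : Int) := by omega
      have hcand : PySem.List.pyGetD L (i - 1) 0 = L[(i - 1).toNat] :=
        PySem.List.pyGetD_eq_getElem (xs := L) (i := i - 1) (d := 0) (by omega) (by push_cast; omega)
      have hcle : L[(i - 1).toNat] ≤ dest := hc3 (i - 1).toNat (by omega) (by omega)
      have hcS : L[(i - 1).toNat] ∈ S := (hmemL _).mp (List.getElem_mem _)
      have hnlt : ¬ v < L[(i - 1).toNat] := fun hlt => hb4 _ hcS hlt hcle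
      have hne : L[(i - 1).toNat] ≠ v := fun he => hvS (he ▸ hcS)
      rw [if_pos hipos, hcand, if_neg (by omega)]
    · rw [if_neg hipos]

theorem pvResolve_eq (S : List Int) (dest : Int) :
    (if S.contains (pvCountdownA S dest 128) then some (pvCountdownA S dest 128) else none)
      = pvResolveB (PySem.List.sorted (PySem.Set.ofList S) (fun x => x) false) dest := by
  refine pvResolve_eq' S _ dest ?_ ?_
  · intro a
    rw [PySem.List.mem_sorted, PySem.Set.mem_ofList]
  · intro p q hp hq hpq
    exact PySem.List.sorted_id_getElem_mono (PySem.Set.ofList S) hpq hq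

-- the chain-building fold of B: keys = processed pointer addresses, each recorded list obeying the
-- chain recurrence (δ is the walk step; processing order makes q + δ never overwritten later)
theorem pvRunBuild (own : Int → List Int) (δ : Int) (hδ : δ ≠ 0) :
    ∀ (M : List Int) (d : PySem.Dict Int (List Int)),
    M.Pairwise (fun a b => b ≠ a ∧ b ≠ a + δ) →
    (∀ q, d.contains q = true → ∀ p ∈ M, p ≠ q ∧ p ≠ q + δ) →
    (∀ q, d.contains q = true → d.getD q [] = own q ++ d.getD (q + δ) []) →
    (∀ q, (M.foldl (fun d p => d.insert p (own p ++ d.getD (p + δ) [])) d).contains q = true ↔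
      (d.contains q = true ∨ q ∈ M)) ∧
    (∀ q, (M.foldl (fun d p => d.insert p (own p ++ d.getD (p + δ) [])) d).contains q = true →
      (M.foldl (fun d p => d.insert p (own p ++ d.getD (p + δ) [])) d).getD q [] =
        own q ++ (M.foldl (fun d p => d.insert p (own p ++ d.getD (p + δ) [])) d).getD (q + δ) []) := by
  intro M
  induction M with
  | nil =>
    intro d _ _ h2
    refine ⟨fun q => by simp, h2⟩
  | cons p M' ih =>
    intro d hM h1 h2
    rw [List.pairwise_cons] at hM
    obtain ⟨hhead, htail⟩ := hM
    simp only [List.foldl_cons]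
    have h1' : ∀ q, (d.insert p (own p ++ d.getD (p + δ) [])).contains q = true →
        ∀ p' ∈ M', p' ≠ q ∧ p' ≠ q + δ := by
      intro q hq p' hp'
      rw [PySem.Dict.contains_insert] at hq
      rcases Bool.or_eq_true_iff.mp hq with hq | hq
      · have : q = p := by simpa using hq
        subst this
        exact hhead p' hp'
      · exact h1 q hq p' (List.mem_cons_of_mem _ hp')
    have h2' : ∀ q, (d.insert p (own p ++ d.getD (p + δ) [])).contains q = true →
        (d.insert p (own p ++ d.getD (p + δ) [])).getD q [] =
          own q ++ (d.insert p (own p ++ d.getD (p + δ) [])).getD (q + δ) [] := by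
      intro q hq
      rw [PySem.Dict.contains_insert] at hq
      by_cases hqp : q = p
      · subst hqp
        rw [PySem.Dict.getD_insert, if_pos rfl, PySem.Dict.getD_insert, if_neg (by omega)]
      · have hq' : d.contains q = true := by
          rcases Bool.or_eq_true_iff.mp hq with hq | hq
          · exact absurd (by simpa using hq) hqp
          · exact hq
        have hne : q + δ ≠ p := (h1 q hq' p (List.mem_cons_self)).2 ∘ Eq.symm
        rw [PySem.Dict.getD_insert, if_neg hqp, PySem.Dict.getD_insert, if_neg (fun h => hne h)]
        exact h2 q hq'
    obtain ⟨ca, cb⟩ := ih (d.insert p (own p ++ d.getD (p + δ) [])) htail h1' h2'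
    refine ⟨?_, cb⟩
    intro q
    rw [ca q, PySem.Dict.contains_insert]
    constructor
    · rintro (hq | hq)
      · rcases Bool.or_eq_true_iff.mp hq with hq | hq
        · exact Or.inr (by simp [show q = p by simpa using hq])
        · exact Or.inl hq
      · exact Or.inr (List.mem_cons_of_mem _ hq)
    · rintro (hq | hq)
      · exact Or.inl (Bool.or_eq_true_iff.mpr (Or.inr hq))
      · rcases List.mem_cons.mp hq with rfl | hq
        · exact Or.inl (by simp)
        · exact Or.inr hq

-- A's right walk collects exactly the precomputed chain list
theorem pvWalkR_chain (set_ptr : PySem.Set Int) (ptr : PySem.Dict Int Int) (S : List Int)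
    (CR : PySem.Dict Int (List Int))
    (hc : ∀ q, CR.contains q = true ↔ PySem.Set.contains set_ptr q = true)
    (hrec : ∀ q, CR.contains q = true →
      CR.getD q [] = pvOwn (PySem.List.sorted (PySem.Set.ofList S) (fun x => x) false) ptr q ++ CR.getD (q + 8) []) :
    ∀ (addr : Int) (acc : PySem.Set Int),
    pvWalkRA set_ptr ptr S addr acc = (CR.getD addr []).foldl PySem.Set.add acc := by
  intro addr acc
  fun_induction pvWalkRA set_ptr ptr S addr acc with
  | case1 addr acc h dest v ih =>
    rw [hrec addr ((hc addr).mpr h), List.foldl_append]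
    have hown : (pvOwn (PySem.List.sorted (PySem.Set.ofList S) (fun x => x) false) ptr addr).foldl
        PySem.Set.add acc = (if S.contains v = true then PySem.Set.add acc v else acc) := by
      unfold pvOwn
      rw [← pvResolve_eq S (ptr.getD addr 0)]
      change (match (if S.contains v = true then some v else none) with
        | some c => [c]
        | none => ([] : List Int)).foldl PySem.Set.add acc = _
      by_cases hcv : v ∈ S <;> simp [hcv, List.foldl]
    rw [hown]
    exact ih
  | case2 addr acc h =>
    have hnc : CR.contains addr = false := by
      cases hcc : CR.contains addr
      · rfl
      · exact absurd ((hc addr).mp hcc) h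
    rw [PySem.Dict.getD_of_not_contains _ _ hnc]
    rfl

-- A's left walk collects exactly the precomputed chain list
theorem pvWalkL_chain (set_ptr : PySem.Set Int) (ptr : PySem.Dict Int Int) (S : List Int)
    (CL : PySem.Dict Int (List Int))
    (hc : ∀ q, CL.contains q = true ↔ PySem.Set.contains set_ptr q = true)
    (hrec : ∀ q, CL.contains q = true →
      CL.getD q [] = pvOwn (PySem.List.sorted (PySem.Set.ofList S) (fun x => x) false) ptr q ++ CL.getD (q - 8) []) :
    ∀ (addr : Int) (acc : PySem.Set Int),
    pvWalkLA set_ptr ptr S addr acc = (CL.getD addr []).foldl PySem.Set.add acc := by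
  intro addr acc
  fun_induction pvWalkLA set_ptr ptr S addr acc with
  | case1 addr acc h dest v ih =>
    rw [hrec addr ((hc addr).mpr h), List.foldl_append]
    have hown : (pvOwn (PySem.List.sorted (PySem.Set.ofList S) (fun x => x) false) ptr addr).foldl
        PySem.Set.add acc = (if S.contains v = true then PySem.Set.add acc v else acc) := by
      unfold pvOwn
      rw [← pvResolve_eq S (ptr.getD addr 0)]
      change (match (if S.contains v = true then some v else none) with
        | some c => [c]
        | none => ([] : List Int)).foldl PySem.Set.add acc = _
      by_cases hcv : v ∈ S <;> simp [hcv, List.foldl]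
    rw [hown]
    exact ih
  | case2 addr acc h =>
    have hnc : CL.contains addr = false := by
      cases hcc : CL.contains addr
      · rfl
      · exact absurd ((hc addr).mp hcc) h
    rw [PySem.Dict.getD_of_not_contains _ _ hnc]
    rfl

-- a fold over enumerate whose body ignores the index is a fold over the list
theorem pvFoldl_enumerate_snd {α β : Type} (g : α → β → α) :
    ∀ (xs : List β) (s : Int) (a : α),
    (PySem.List.enumerate xs s).foldl (fun acc p => g acc p.2) a = xs.foldl g a := by
  intro xs
  induction xs with
  | nil => intro s a; simp [PySem.List.enumerate_nil]
  | cons x xs ih => intro s a; simp [PySem.List.enumerate_cons, ih]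

theorem pvLnBridge (lv : List Int) (szd : PySem.Dict Int Int) :
    ∀ (t : List Int) (j : Nat) (c : Int) (d : PySem.Dict Int Int),
    lv.drop j = c :: t →
    (PySem.List.enumerate t ((j : Int) + 1)).foldl
      (fun d iv =>
        if PySem.Dict.getD szd iv.2 0 ≤ 0 then d
        else if 0 ≤ iv.1 - 1 ∧ PySem.List.pyGetD lv iv.1 0 - PySem.List.pyGetD lv (iv.1 - 1) 0 < 512
          then d.insert iv.2 (PySem.List.pyGetD lv (iv.1 - 1) 0) else d) d
    = (List.zip (c :: t) t).foldl
      (fun d pc => if 0 < PySem.Dict.getD szd pc.2 0 ∧ pc.2 - pc.1 < 512 then d.insert pc.2 pc.1 else d) d := by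
  intro t
  induction t with
  | nil => intro j c d hdrop; simp [PySem.List.enumerate_nil]
  | cons x t ih =>
    intro j c d hdrop
    have hc : lv[j]? = some c := by
      have h := List.getElem?_drop (xs := lv) (i := j) (j := 0)
      rw [hdrop] at h; simpa using h.symm
    have hx : lv[j + 1]? = some x := by
      have h := List.getElem?_drop (xs := lv) (i := j) (j := 1)
      rw [hdrop] at h; simpa using h.symm
    have hgx : PySem.List.pyGetD lv ((j : Int) + 1) 0 = x := by
      have : ((j : Int) + 1) = ((j + 1 : Nat) : Int) := by push_cast; ring
      rw [this, PySem.List.pyGetD_natCast, List.getD_eq_getElem?_getD, hx]; rfl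
    have hgc : PySem.List.pyGetD lv ((j : Int) + 1 - 1) 0 = c := by
      have : ((j : Int) + 1 - 1) = ((j : Nat) : Int) := by push_cast; ring
      rw [this, PySem.List.pyGetD_natCast, List.getD_eq_getElem?_getD, hc]; rfl
    rw [PySem.List.enumerate_cons, List.zip_cons_cons, List.foldl_cons, List.foldl_cons]
    have hstep : (if PySem.Dict.getD szd x 0 ≤ 0 then d
        else if 0 ≤ (j : Int) + 1 - 1 ∧ PySem.List.pyGetD lv ((j : Int) + 1) 0 - PySem.List.pyGetD lv ((j : Int) + 1 - 1) 0 < 512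
          then d.insert x (PySem.List.pyGetD lv ((j : Int) + 1 - 1) 0) else d)
        = (if 0 < PySem.Dict.getD szd x 0 ∧ x - c < 512 then d.insert x c else d) := by
      rw [hgx, hgc]
      split_ifs with h1 h2 h3 <;> first | rfl | omega
    rw [hstep]
    have hdrop' : lv.drop (j + 1) = x :: t := by
      have : lv.drop (j + 1) = (lv.drop j).drop 1 := by rw [List.drop_drop]
      rw [this, hdrop]; rfl
    have hcast : (j : Int) + 1 + 1 = ((j + 1 : Nat) : Int) + 1 := by push_cast; ring
    rw [hcast]
    exact ih (j + 1) x _ hdrop'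

theorem pvRnBridge (lv : List Int) (szd : PySem.Dict Int Int) :
    ∀ (t : List Int) (j : Nat) (c : Int) (d : PySem.Dict Int Int),
    lv.drop j = c :: t →
    (PySem.List.enumerate (c :: t) (j : Int)).foldl
      (fun d iv =>
        if PySem.Dict.getD szd iv.2 0 ≤ 0 then d
        else if iv.1 + 1 < PySem.List.len lv ∧ PySem.List.pyGetD lv (iv.1 + 1) 0 - PySem.List.pyGetD lv iv.1 0 < 512
          then d.insert iv.2 (PySem.List.pyGetD lv (iv.1 + 1) 0) else d) d
    = (List.zip (c :: t) t).foldl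
      (fun d cn => if 0 < PySem.Dict.getD szd cn.1 0 ∧ cn.2 - cn.1 < 512 then d.insert cn.1 cn.2 else d) d := by
  intro t
  induction t with
  | nil =>
    intro j c d hdrop
    have hlen : lv.length = j + 1 := by
      have h1 := List.length_drop (l := lv) (i := j)
      rw [hdrop] at h1
      have h2 : j < lv.length := by
        by_contra hge
        rw [List.drop_eq_nil_of_le (by omega)] at hdrop; cases hdrop
      simp at h1; omega
    rw [PySem.List.enumerate_cons, PySem.List.enumerate_nil]
    simp only [List.zip_nil_right, List.foldl_cons, List.foldl_nil]
    rw [PySem.List.len_eq, hlen]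
    split_ifs with h1 h2 <;> first | rfl | (exfalso; push_cast at h2; omega)
  | cons x t ih =>
    intro j c d hdrop
    have hc : lv[j]? = some c := by
      have h := List.getElem?_drop (xs := lv) (i := j) (j := 0)
      rw [hdrop] at h; simpa using h.symm
    have hx : lv[j + 1]? = some x := by
      have h := List.getElem?_drop (xs := lv) (i := j) (j := 1)
      rw [hdrop] at h; simpa using h.symm
    have hjlen : (j : Int) + 1 < PySem.List.len lv := by
      rw [PySem.List.len_eq]
      have : j + 1 < lv.length := by
        rcases List.getElem?_eq_some_iff.mp hx with ⟨h, _⟩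
        omega
      push_cast; omega
    have hgx : PySem.List.pyGetD lv ((j : Int) + 1) 0 = x := by
      have : ((j : Int) + 1) = ((j + 1 : Nat) : Int) := by push_cast; ring
      rw [this, PySem.List.pyGetD_natCast, List.getD_eq_getElem?_getD, hx]; rfl
    have hgc : PySem.List.pyGetD lv ((j : Nat) : Int) 0 = c := by
      rw [PySem.List.pyGetD_natCast, List.getD_eq_getElem?_getD, hc]; rfl
    rw [PySem.List.enumerate_cons, List.zip_cons_cons, List.foldl_cons, List.foldl_cons]
    have hstep : (if PySem.Dict.getD szd c 0 ≤ 0 then d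
        else if (j : Int) + 1 < PySem.List.len lv ∧ PySem.List.pyGetD lv ((j : Int) + 1) 0 - PySem.List.pyGetD lv ((j : Nat) : Int) 0 < 512
          then d.insert c (PySem.List.pyGetD lv ((j : Int) + 1) 0) else d)
        = (if 0 < PySem.Dict.getD szd c 0 ∧ x - c < 512 then d.insert c x else d) := by
      rw [hgx, hgc]
      split_ifs with h1 h2 h3 <;> first | rfl | omega | (exfalso; exact h2 ⟨hjlen, by omega⟩)
    rw [hstep]
    have hdrop' : lv.drop (j + 1) = x :: t := by
      have : lv.drop (j + 1) = (lv.drop j).drop 1 := by rw [List.drop_drop]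
      rw [this, hdrop]; rfl
    have hcast : (j : Int) + 1 = ((j + 1 : Nat) : Int) := by push_cast; ring
    rw [hcast]
    exact ih (j + 1) x _ hdrop'

theorem pvFoldl_prod4 {α β γ δ ε : Type} (l : List ε) (f1 : α → ε → α) (f2 : β → ε → β)
    (f3 : γ → ε → γ) (f4 : δ → ε → δ) (a : α) (b : β) (c : γ) (d : δ) :
    l.foldl (fun st iv => (f1 st.1 iv, f2 st.2.1 iv, f3 st.2.2.1 iv, f4 st.2.2.2 iv)) (a, b, c, d)
      = (l.foldl f1 a, l.foldl f2 b, l.foldl f3 c, l.foldl f4 d) := by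
  induction l generalizing a b c d with
  | nil => rfl
  | cons x l ih => simp only [List.foldl_cons]; exact ih _ _ _ _

-- instantiations of the chain-building fold for B's two passes (M strictly increasing)
theorem pvChainR_props (own : Int → List Int) (M : List Int) (hM : M.Pairwise (· < ·)) :
    (∀ q, (M.reverse.foldl (fun d p => d.insert p (own p ++ d.getD (p + 8) [])) (PySem.Dict.empty : PySem.Dict Int (List Int))).contains q = true ↔ q ∈ M) ∧
    (∀ q, (M.reverse.foldl (fun d p => d.insert p (own p ++ d.getD (p + 8) [])) (PySem.Dict.empty : PySem.Dict Int (List Int))).contains q = true →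
      (M.reverse.foldl (fun d p => d.insert p (own p ++ d.getD (p + 8) [])) (PySem.Dict.empty : PySem.Dict Int (List Int))).getD q [] =
        own q ++ (M.reverse.foldl (fun d p => d.insert p (own p ++ d.getD (p + 8) [])) (PySem.Dict.empty : PySem.Dict Int (List Int))).getD (q + 8) []) := by
  obtain ⟨a, b⟩ := pvRunBuild own 8 (by norm_num) M.reverse PySem.Dict.empty
    (List.pairwise_reverse.mpr (hM.imp (fun h => ⟨by omega, by omega⟩)))
    (by intro q hq; rw [PySem.Dict.contains_empty] at hq; cases hq)
    (by intro q hq; rw [PySem.Dict.contains_empty] at hq; cases hq)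
  refine ⟨fun q => ?_, b⟩
  rw [a q, PySem.Dict.contains_empty]
  simp

theorem pvChainL_props (own : Int → List Int) (M : List Int) (hM : M.Pairwise (· < ·)) :
    (∀ q, (M.foldl (fun d p => d.insert p (own p ++ d.getD (p - 8) [])) (PySem.Dict.empty : PySem.Dict Int (List Int))).contains q = true ↔ q ∈ M) ∧
    (∀ q, (M.foldl (fun d p => d.insert p (own p ++ d.getD (p - 8) [])) (PySem.Dict.empty : PySem.Dict Int (List Int))).contains q = true →
      (M.foldl (fun d p => d.insert p (own p ++ d.getD (p - 8) [])) (PySem.Dict.empty : PySem.Dict Int (List Int))).getD q [] =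
        own q ++ (M.foldl (fun d p => d.insert p (own p ++ d.getD (p - 8) [])) (PySem.Dict.empty : PySem.Dict Int (List Int))).getD (q - 8) []) := by
  simp only [Int.sub_eq_add_neg]
  obtain ⟨a, b⟩ := pvRunBuild own (-8) (by norm_num) M PySem.Dict.empty
    (hM.imp (fun h => ⟨by omega, by omega⟩))
    (by intro q hq; rw [PySem.Dict.contains_empty] at hq; cases hq)
    (by intro q hq; rw [PySem.Dict.contains_empty] at hq; cases hq)
  refine ⟨fun q => ?_, b⟩
  rw [a q, PySem.Dict.contains_empty]
  simp

def pvA1 (lv : List Int) (szd : PySem.Dict Int Int) (d : PySem.Dict Int Int) (iv : Int × Int) : PySem.Dict Int Int :=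
  if szd.getD iv.2 0 ≤ 0 then d
  else if 0 ≤ iv.1 - 1 ∧ PySem.List.pyGetD lv iv.1 0 - PySem.List.pyGetD lv (iv.1 - 1) 0 < 512
    then d.insert iv.2 (PySem.List.pyGetD lv (iv.1 - 1) 0) else d

def pvA2 (lv : List Int) (szd : PySem.Dict Int Int) (d : PySem.Dict Int Int) (iv : Int × Int) : PySem.Dict Int Int :=
  if szd.getD iv.2 0 ≤ 0 then d
  else if iv.1 + 1 < PySem.List.len lv ∧ PySem.List.pyGetD lv (iv.1 + 1) 0 - PySem.List.pyGetD lv iv.1 0 < 512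
    then d.insert iv.2 (PySem.List.pyGetD lv (iv.1 + 1) 0) else d

def pvA3 (set_ptr : PySem.Set Int) (ptr : PySem.Dict Int Int) (S : List Int) (szd : PySem.Dict Int Int)
    (d : PySem.Dict Int (List Int)) (iv : Int × Int) : PySem.Dict Int (List Int) :=
  if szd.getD iv.2 0 ≤ 0 then d else d.insert iv.2 (pvWalkLA set_ptr ptr S (iv.2 - 8) PySem.Set.empty)

def pvA4 (set_ptr : PySem.Set Int) (ptr : PySem.Dict Int Int) (S : List Int) (szd : PySem.Dict Int Int)
    (d : PySem.Dict Int (List Int)) (iv : Int × Int) : PySem.Dict Int (List Int) :=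
  if szd.getD iv.2 0 ≤ 0 then d else d.insert iv.2 (pvWalkRA set_ptr ptr S (iv.2 + szd.getD iv.2 0) PySem.Set.empty)

-- ===== VERDICT (by name: the statement is the Claim_ definition above) =====
theorem get_node_neighbor_seg_spec : Claim_equal_get_node_neighbor_seg := by
  unfold Claim_equal_get_node_neighbor_seg
  intro lv sz p2d S _hdom _hpre
  unfold Spec_get_node_neighbor_seg
  unfold get_node_neighbor_seg get_node_neighbor_seg_alt
  dsimp only
  set SZ : PySem.Dict Int Int := PySem.Dict.mk sz with hSZ
  set PT : PySem.Dict Int Int := PySem.Dict.mk p2d with hPT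
  set SP : PySem.Set Int := PySem.Set.ofList (PySem.Dict.keys PT) with hSP
  set SA : List Int := PySem.List.sorted (PySem.Set.ofList S) (fun x => x) false with hSA
  set LL : List Int := PySem.List.sorted SP (fun x => x) false with hLL
  set CR : PySem.Dict Int (List Int) := LL.reverse.foldl
    (fun d p => d.insert p (pvOwn SA PT p ++ d.getD (p + 8) [])) PySem.Dict.empty with hCRdef
  set CL : PySem.Dict Int (List Int) := LL.foldl
    (fun d p => d.insert p (pvOwn SA PT p ++ d.getD (p - 8) [])) PySem.Dict.empty with hCLdef
  have hplt : LL.Pairwise (· < ·) := by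
    rw [hLL, hSP]
    exact PySem.List.sorted_ofList_pairwise_lt _
  obtain ⟨hRc', hRrec⟩ := pvChainR_props (pvOwn SA PT) LL hplt
  obtain ⟨hLc', hLrec⟩ := pvChainL_props (pvOwn SA PT) LL hplt
  rw [← hCRdef] at hRc' hRrec
  rw [← hCLdef] at hLc' hLrec
  have hmemLL : ∀ q, q ∈ LL ↔ PySem.Set.contains SP q = true := by
    intro q
    rw [hLL, PySem.List.mem_sorted, PySem.Set.contains_iff]
  have hwL : ∀ (v : Int) (acc : PySem.Set Int),
      pvWalkLA SP PT S v acc = (CL.getD v []).foldl PySem.Set.add acc :=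
    pvWalkL_chain SP PT S CL (fun q => (hLc' q).trans (hmemLL q)) hLrec
  have hwR : ∀ (v : Int) (acc : PySem.Set Int),
      pvWalkRA SP PT S v acc = (CR.getD v []).foldl PySem.Set.add acc :=
    pvWalkR_chain SP PT S CR (fun q => (hRc' q).trans (hmemLL q)) hRrec
  have hA : (fun (st : PySem.Dict Int Int × PySem.Dict Int Int × PySem.Dict Int (List Int) × PySem.Dict Int (List Int)) (iv : Int × Int) =>
      if SZ.getD iv.2 0 ≤ 0 then st
      else
        (if 0 ≤ iv.1 - 1 ∧ PySem.List.pyGetD lv iv.1 0 - PySem.List.pyGetD lv (iv.1 - 1) 0 < 512 then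
            st.1.insert iv.2 (PySem.List.pyGetD lv (iv.1 - 1) 0)
          else st.1,
          if iv.1 + 1 < PySem.List.len lv ∧ PySem.List.pyGetD lv (iv.1 + 1) 0 - PySem.List.pyGetD lv iv.1 0 < 512 then
            st.2.1.insert iv.2 (PySem.List.pyGetD lv (iv.1 + 1) 0)
          else st.2.1,
          st.2.2.1.insert iv.2 (pvWalkLA SP PT S (iv.2 - 8) PySem.Set.empty),
          st.2.2.2.insert iv.2 (pvWalkRA SP PT S (iv.2 + SZ.getD iv.2 0) PySem.Set.empty)))
      = (fun st iv =>
          (pvA1 lv SZ st.1 iv, pvA2 lv SZ st.2.1 iv, pvA3 SP PT S SZ st.2.2.1 iv, pvA4 SP PT S SZ st.2.2.2 iv)) := by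
    funext st iv
    simp only [pvA1, pvA2, pvA3, pvA4]
    by_cases h : SZ.getD iv.2 0 ≤ 0
    · simp [h]
    · simp [h]
  rw [hA, pvFoldl_prod4]
  have hB : (fun (st : PySem.Dict Int (List Int) × PySem.Dict Int (List Int)) (v : Int) =>
      if SZ.getD v 0 ≤ 0 then st
      else
        (st.1.insert v (PySem.Set.ofList (CL.getD (v - 8) [])),
         st.2.insert v (PySem.Set.ofList (CR.getD (v + SZ.getD v 0) []))))
      = (fun st v =>
          ((fun (d : PySem.Dict Int (List Int)) (v : Int) =>
            if SZ.getD v 0 ≤ 0 then d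
            else d.insert v (PySem.Set.ofList (CL.getD (v - 8) []))) st.1 v,
           (fun (d : PySem.Dict Int (List Int)) (v : Int) =>
            if SZ.getD v 0 ≤ 0 then d
            else d.insert v (PySem.Set.ofList (CR.getD (v + SZ.getD v 0) []))) st.2 v)) := by
    funext st v
    by_cases h : SZ.getD v 0 ≤ 0
    · simp [h]
    · simp [h]
  rw [hB, PySem.List.foldl_prod_mk (f := (fun (d : PySem.Dict Int (List Int)) (v : Int) =>
        if SZ.getD v 0 ≤ 0 then d
        else d.insert v (PySem.Set.ofList (CL.getD (v - 8) [])))) (g := (fun (d : PySem.Dict Int (List Int)) (v : Int) =>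
        if SZ.getD v 0 ≤ 0 then d
        else d.insert v (PySem.Set.ofList (CR.getD (v + SZ.getD v 0) []))))]
  dsimp only
  simp only [Prod.mk.injEq]
  refine ⟨?_, ?_, ?_, ?_⟩
  · -- ln
    apply congrArg
    rw [PySem.List.slice_from_one]
    cases lv with
    | nil => simp [PySem.List.enumerate_nil]
    | cons c rest =>
      rw [PySem.List.enumerate_cons, List.foldl_cons]
      have h0 : pvA1 (c :: rest) SZ PySem.Dict.empty (0, c) = PySem.Dict.empty := by
        simp only [pvA1]
        split_ifs with h1 h2 <;> first | rfl | omega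
      rw [h0]
      have hb := pvLnBridge (c :: rest) SZ rest 0 c PySem.Dict.empty (by simp)
      simp only [Nat.cast_zero, zero_add] at hb
      simpa only [pvA1, List.tail_cons, zero_add] using hb
  · -- rn
    apply congrArg
    rw [PySem.List.slice_from_one]
    cases lv with
    | nil => simp [PySem.List.enumerate_nil]
    | cons c rest =>
      have hb := pvRnBridge (c :: rest) SZ rest 0 c PySem.Dict.empty (by simp)
      simp only [Nat.cast_zero] at hb
      simpa only [pvA2, List.tail_cons] using hb
  · -- lp
    apply congrArg
    rw [show pvA3 SP PT S SZ
        = (fun (acc : PySem.Dict Int (List Int)) (p : Int × Int) =>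
            if SZ.getD p.2 0 ≤ 0 then acc
            else acc.insert p.2 (pvWalkLA SP PT S (p.2 - 8) PySem.Set.empty))
      from funext fun d => funext fun iv => by simp [pvA3]]
    rw [pvFoldl_enumerate_snd (g := fun (d : PySem.Dict Int (List Int)) (v : Int) =>
      if SZ.getD v 0 ≤ 0 then d
      else d.insert v (pvWalkLA SP PT S (v - 8) PySem.Set.empty))]
    have hfun : (fun (d : PySem.Dict Int (List Int)) (v : Int) =>
        if SZ.getD v 0 ≤ 0 then d
        else d.insert v (pvWalkLA SP PT S (v - 8) PySem.Set.empty))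
        = (fun (d : PySem.Dict Int (List Int)) (v : Int) =>
        if SZ.getD v 0 ≤ 0 then d
        else d.insert v (PySem.Set.ofList (CL.getD (v - 8) []))) := by
      funext d v
      rw [hwL]
      rfl
    rw [hfun]
  · -- rp
    apply congrArg
    rw [show pvA4 SP PT S SZ
        = (fun (acc : PySem.Dict Int (List Int)) (p : Int × Int) =>
            if SZ.getD p.2 0 ≤ 0 then acc
            else acc.insert p.2 (pvWalkRA SP PT S (p.2 + SZ.getD p.2 0) PySem.Set.empty))
      from funext fun d => funext fun iv => by simp [pvA4]]
    rw [pvFoldl_enumerate_snd (g := fun (d : PySem.Dict Int (List Int)) (v : Int) =>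
      if SZ.getD v 0 ≤ 0 then d
      else d.insert v (pvWalkRA SP PT S (v + SZ.getD v 0) PySem.Set.empty))]
    have hfun : (fun (d : PySem.Dict Int (List Int)) (v : Int) =>
        if SZ.getD v 0 ≤ 0 then d
        else d.insert v (pvWalkRA SP PT S (v + SZ.getD v 0) PySem.Set.empty))
        = (fun (d : PySem.Dict Int (List Int)) (v : Int) =>
        if SZ.getD v 0 ≤ 0 then d
        else d.insert v (PySem.Set.ofList (CR.getD (v + SZ.getD v 0) []))) := by
      funext d v
      rw [hwR]
      rfl
    rw [hfun]
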